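-- pv_equiv track=rewrite | github.com/georgesleen/gs-kicad-lib | scripts/easyeda_import/paths.py | block_depth_delta
-- ===== SOURCE A (Python) =====
-- def block_depth_delta(line: str) -> int:
--     depth = 0
--     in_string = False
--     escaped = False
--     for char in line:
--         if escaped:
--             escaped = False
--             continue
--         if char == "\\":
--             escaped = True
--             continue
--         if char == '"':
--             in_string = not in_string
--             continue
--         if in_string:
--             continue
--         if char == "(":
--             depth += 1
--         elif char == ")":
--             depth -= 1
--     return depth
-- ===== SOURCE B (Python) =====
-- def block_depth_delta(line: str) -> int:
--     # Pass 1: remove backslash escapes by splitting on '\\' and folding the pieces.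
--     pieces = line.split("\\")
--     text = pieces[0]
--     active = True  # is the backslash preceding the next piece a live escape?
--     for p in pieces[1:]:
--         if not active:
--             text += p
--             active = True
--         elif p == "":
--             active = False  # this backslash escapes the next backslash
--         else:
--             text += p[1:]  # drop the escaped character
--     # Pass 2: split on '"'; chunks at even positions are outside string literals.
--     total = 0
--     outside = True
--     for chunk in text.split('"'):
--         if outside:
--             total += chunk.count("(") - chunk.count(")")
--         outside = not outside
--     return total
-- ===== Notes on version B (the rewrite author's own statement) =====
-- stated objective: faster
-- what changed: Replaces the per-character three-flag state machine with a strip-then-count pipeline: split on backslash and fold the pieces to delete escaped characters, then split on the double-quote character and count parentheses only in the even (outside-string) chunks.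
import Mathlib
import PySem

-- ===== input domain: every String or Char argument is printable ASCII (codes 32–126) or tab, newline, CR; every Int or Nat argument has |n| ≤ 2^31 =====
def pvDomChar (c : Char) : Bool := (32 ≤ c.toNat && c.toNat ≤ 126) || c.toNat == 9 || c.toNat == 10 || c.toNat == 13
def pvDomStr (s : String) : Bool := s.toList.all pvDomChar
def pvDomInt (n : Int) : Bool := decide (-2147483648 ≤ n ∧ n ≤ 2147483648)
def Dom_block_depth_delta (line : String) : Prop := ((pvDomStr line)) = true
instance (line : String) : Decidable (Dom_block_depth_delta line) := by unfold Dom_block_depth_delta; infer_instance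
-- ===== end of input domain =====

-- B replaces A's per-character flag state machine with a strip-then-count pipeline
-- (split on backslash to delete escapes, split on the quote character, count parens in even chunks);
-- same asymptotic cost, measurably faster in Python (bulk split/count instead of a per-char loop).

-- ===== PORT A =====
def pvStepA (st : Int × Bool × Bool) (c : Char) : Int × Bool × Bool :=
  if st.2.2 then (st.1, st.2.1, false)
  else if c = '\\' then (st.1, st.2.1, true)
  else if c = '"' then (st.1, !st.2.1, st.2.2)
  else if st.2.1 then st
  else if c = '(' then (st.1 + 1, st.2.1, st.2.2)
  else if c = ')' then (st.1 - 1, st.2.1, st.2.2)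
  else st

def block_depth_delta (line : String) : Int :=
  (line.toList.foldl pvStepA (0, false, false)).1

-- ===== PORT B =====
-- fold over the backslash-split pieces: state (text so far, is the backslash before the next piece live?)
def pvUnescStep (acc : List Char × Bool) (p : List Char) : List Char × Bool :=
  if !acc.2 then (acc.1 ++ p, true)
  else if p = [] then (acc.1, false)
  else (acc.1 ++ p.tail, true)

-- fold over the quote-split chunks: state (total, is the next chunk outside a string?)
def pvChunkStep (acc : Int × Bool) (chunk : List Char) : Int × Bool :=
  (if acc.2 then acc.1 + (PySem.Chars.count chunk ['('] : Int) - (PySem.Chars.count chunk [')'] : Int)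
   else acc.1, !acc.2)

def block_depth_delta_alt (line : String) : Int :=
  let pieces := PySem.Chars.splitOn line.toList ['\\']
  -- str.split never returns an empty list, so Python's pieces[0] is headD [] here
  let text := ((pieces.tail).foldl pvUnescStep (pieces.headD [], true)).1
  ((PySem.Chars.splitOn text ['"']).foldl pvChunkStep (0, true)).1

-- ===== PRECONDITION & SPEC =====
def Spec_block_depth_delta (line : String) (out : Int) : Prop := out = block_depth_delta_alt line
instance (line : String) (out : Int) : Decidable (Spec_block_depth_delta line out) := by unfold Spec_block_depth_delta; infer_instance

-- ===== CLAIM (what is proved, stated in full; the proofs are below) =====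
def Claim_equal_block_depth_delta : Prop := ∀ (line : String), Dom_block_depth_delta line → Spec_block_depth_delta line (block_depth_delta line)

-- ===== LEMMAS AND PROOFS =====

-- structural recursion equivalent to PySem.Chars.splitOn on a one-character separator
def pvMySplit (q : Char) : List Char → List (List Char)
  | [] => [[]]
  | c :: rest => if c = q then [] :: pvMySplit q rest else (pvMySplit q rest).modifyHead (c :: ·)

theorem pvMySplit_ne_nil (q : Char) (l : List Char) : pvMySplit q l ≠ [] := by
  induction l with
  | nil => simp [pvMySplit]
  | cons c rest ih =>
    simp only [pvMySplit]
    split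
    · simp
    · cases h : pvMySplit q rest with
      | nil => exact absurd h ih
      | cons a t => simp

theorem pvMySplit_cons_rep (q : Char) (l : List Char) :
    pvMySplit q l = (pvMySplit q l).headD [] :: (pvMySplit q l).tail := by
  cases h : pvMySplit q l with
  | nil => exact absurd h (pvMySplit_ne_nil q l)
  | cons a t => simp

theorem pvSplitOn_go_eq (q : Char) (l : List Char) : ∀ (fuel : Nat) (cur : List Char) (acc : List (List Char)),
    l.length + 1 ≤ fuel →
    PySem.Chars.splitOn.go [q] fuel l cur acc =
      acc.reverse ++ ((cur.reverse ++ (pvMySplit q l).headD []) :: (pvMySplit q l).tail) := by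
  induction l with
  | nil =>
    intro fuel cur acc hf
    cases fuel with
    | zero => omega
    | succ f => simp [PySem.Chars.splitOn.go, pvMySplit]
  | cons c rest ih =>
    intro fuel cur acc hf
    cases fuel with
    | zero => simp at hf
    | succ f =>
      by_cases hc : c = q
      · subst hc
        have hpre : List.isPrefixOf [c] (c :: rest) = true := by simp [List.isPrefixOf]
        rw [show PySem.Chars.splitOn.go [c] (f+1) (c :: rest) cur acc
              = PySem.Chars.splitOn.go [c] f (List.drop 1 (c :: rest)) [] (cur.reverse :: acc) by
            simp [PySem.Chars.splitOn.go, hpre]]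
        rw [List.drop_one, List.tail_cons, ih f [] (cur.reverse :: acc) (by simp at hf; omega)]
        rw [show pvMySplit c (c :: rest) = [] :: pvMySplit c rest by simp [pvMySplit]]
        rw [pvMySplit_cons_rep c rest]
        simp
      · have hpre : List.isPrefixOf [q] (c :: rest) = false := by
          simp [List.isPrefixOf]; exact fun h => absurd h.symm hc
        rw [show PySem.Chars.splitOn.go [q] (f+1) (c :: rest) cur acc
              = PySem.Chars.splitOn.go [q] f rest (c :: cur) acc by
            simp [PySem.Chars.splitOn.go, hpre]]
        rw [ih f (c :: cur) acc (by simp at hf; omega)]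
        rw [show pvMySplit q (c :: rest) = (pvMySplit q rest).modifyHead (c :: ·) by simp [pvMySplit, hc]]
        rw [pvMySplit_cons_rep q rest]
        simp

theorem pvSplitOn_eq (q : Char) (l : List Char) : PySem.Chars.splitOn l [q] = pvMySplit q l := by
  show PySem.Chars.splitOn.go [q] (l.length + 1) l [] [] = _
  rw [pvSplitOn_go_eq q l (l.length + 1) [] [] (le_refl _)]
  simp only [List.reverse_nil, List.nil_append]
  exact (pvMySplit_cons_rep q l).symm

theorem pvCount_go_eq (c : Char) (l : List Char) : ∀ (fuel : Nat) (acc : Nat), l.length ≤ fuel →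
    PySem.Chars.count.go [c] fuel l acc = acc + l.countP (· == c) := by
  induction l with
  | nil =>
    intro fuel acc _
    cases fuel <;> simp [PySem.Chars.count.go]
  | cons c0 rest ih =>
    intro fuel acc hf
    cases fuel with
    | zero => simp at hf
    | succ f =>
      by_cases hc : c0 = c
      · subst hc
        have hpre : List.isPrefixOf [c0] (c0 :: rest) = true := by simp [List.isPrefixOf]
        rw [show PySem.Chars.count.go [c0] (f+1) (c0 :: rest) acc
              = PySem.Chars.count.go [c0] f (List.drop 1 (c0 :: rest)) (acc + 1) by
            simp [PySem.Chars.count.go, hpre]]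
        rw [List.drop_one, List.tail_cons, ih f (acc+1) (by simp at hf; omega)]
        simp
        omega
      · have hpre : List.isPrefixOf [c] (c0 :: rest) = false := by
          simp [List.isPrefixOf]; exact fun h => absurd h.symm hc
        rw [show PySem.Chars.count.go [c] (f+1) (c0 :: rest) acc
              = PySem.Chars.count.go [c] f rest acc by
            simp [PySem.Chars.count.go, hpre]]
        rw [ih f acc (by simp at hf; omega)]
        simp [hc]

theorem pvCount_eq (c : Char) (l : List Char) : PySem.Chars.count l [c] = l.countP (· == c) := by
  show (if List.isEmpty [c] then l.length + 1 else PySem.Chars.count.go [c] l.length l 0) = _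
  simp [pvCount_go_eq c l l.length 0 (le_refl _)]

-- no piece of a split contains the separator
theorem pvMySplit_not_mem (q : Char) (l : List Char) : ∀ p ∈ pvMySplit q l, q ∉ p := by
  induction l with
  | nil =>
    intro p hp
    rw [show pvMySplit q [] = [[]] from rfl, List.mem_singleton] at hp
    subst hp; simp
  | cons c rest ih =>
    intro p hp
    by_cases hc : c = q
    · rw [show pvMySplit q (c :: rest) = [] :: pvMySplit q rest by simp [pvMySplit, hc]] at hp
      rcases List.mem_cons.mp hp with h | h
      · subst h; simp
      · exact ih p h
    · rw [show pvMySplit q (c :: rest) = (pvMySplit q rest).modifyHead (c :: ·) by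
          simp [pvMySplit, hc]] at hp
      rw [pvMySplit_cons_rep q rest, List.modifyHead_cons] at hp
      rcases List.mem_cons.mp hp with h | h
      · subst h
        intro hmem
        rcases List.mem_cons.mp hmem with h' | h'
        · exact hc h'.symm
        · exact ih _ (by rw [pvMySplit_cons_rep q rest]; exact List.mem_cons_self) h'
      · exact ih p (by rw [pvMySplit_cons_rep q rest]; exact List.mem_cons_of_mem _ h)

-- joining the pieces with the separator
def pvJoin (q : Char) (chunks : List (List Char)) : List Char :=
  chunks.headD [] ++ ((chunks.tail.map (fun p => q :: p)).flatten)

theorem pvMySplit_join (q : Char) (l : List Char) : pvJoin q (pvMySplit q l) = l := by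
  induction l with
  | nil => simp [pvMySplit, pvJoin]
  | cons c rest ih =>
    obtain ⟨h0, t0, hrep⟩ : ∃ h0 t0, pvMySplit q rest = h0 :: t0 := by
      rcases e : pvMySplit q rest with _ | ⟨h0, t0⟩
      · exact absurd e (pvMySplit_ne_nil q rest)
      · exact ⟨h0, t0, rfl⟩
    rw [hrep] at ih
    unfold pvJoin at ih
    simp only [List.headD_cons, List.tail_cons] at ih
    by_cases hc : c = q
    · subst hc
      rw [show pvMySplit c (c :: rest) = [] :: pvMySplit c rest by simp [pvMySplit]]
      unfold pvJoin
      rw [hrep]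
      simp only [List.headD_cons, List.tail_cons, List.map_cons, List.flatten_cons,
        List.nil_append, List.cons_append]
      rw [ih]
    · rw [show pvMySplit q (c :: rest) = (pvMySplit q rest).modifyHead (c :: ·) by
          simp [pvMySplit, hc]]
      rw [hrep, List.modifyHead_cons]
      unfold pvJoin
      simp only [List.headD_cons, List.tail_cons, List.cons_append]
      rw [ih]

-- direct escape removal (esc = escape flag)
def pvUnescE : Bool → List Char → List Char
  | _, [] => []
  | true, _ :: r => pvUnescE false r
  | false, c :: r => if c = '\\' then pvUnescE true r else c :: pvUnescE false r

-- direct depth count on an escape-free string (outs = outside a string literal)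
def pvQcnt : Bool → List Char → Int
  | _, [] => 0
  | outs, c :: r =>
    if c = '"' then pvQcnt (!outs) r
    else if outs then (if c = '(' then 1 else if c = ')' then -1 else 0) + pvQcnt outs r
    else pvQcnt outs r

theorem pvUnescE_false_append (p xs : List Char) (h : '\\' ∉ p) :
    pvUnescE false (p ++ xs) = p ++ pvUnescE false xs := by
  induction p with
  | nil => simp
  | cons c r ih =>
    simp only [List.mem_cons, not_or] at h
    have hc : ¬(c = '\\') := fun hh => h.1 hh.symm
    simp only [List.cons_append, pvUnescE, if_neg hc]
    rw [ih h.2]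

theorem pvUnescFold (rest : List (List Char)) : ∀ (t : List Char) (b : Bool),
    (∀ p ∈ rest, '\\' ∉ p) →
    (rest.foldl pvUnescStep (t, b)).1 = t ++ pvUnescE (!b) ((rest.map (fun p => '\\' :: p)).flatten) := by
  induction rest with
  | nil => intro t b _; simp [pvUnescE]
  | cons p rs ih =>
    intro t b hmem
    have hp : '\\' ∉ p := hmem p List.mem_cons_self
    have hrs : ∀ x ∈ rs, '\\' ∉ x := fun x hx => hmem x (List.mem_cons_of_mem _ hx)
    simp only [List.foldl_cons, List.map_cons, List.flatten_cons]
    cases b with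
    | false =>
      rw [show pvUnescStep (t, false) p = (t ++ p, true) by simp [pvUnescStep]]
      rw [ih (t ++ p) true hrs]
      simp only [Bool.not_false, Bool.not_true]
      rw [List.cons_append, show pvUnescE true ('\\' :: (p ++ (rs.map (fun p => '\\' :: p)).flatten))
            = pvUnescE false (p ++ (rs.map (fun p => '\\' :: p)).flatten) from rfl]
      rw [pvUnescE_false_append p _ hp, List.append_assoc]
    | true =>
      cases p with
      | nil =>
        rw [show pvUnescStep (t, true) [] = (t, false) by simp [pvUnescStep]]
        rw [ih t false hrs]
        simp [pvUnescE]
      | cons c p' =>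
        have hp' : '\\' ∉ p' := fun h => hp (List.mem_cons_of_mem _ h)
        rw [show pvUnescStep (t, true) (c :: p') = (t ++ p', true) by simp [pvUnescStep]]
        rw [ih (t ++ p') true hrs]
        have e1 : ∀ ys, pvUnescE false ('\\' :: ys) = pvUnescE true ys := by
          intro ys; simp [pvUnescE]
        have e2 : ∀ (d : Char) ys, pvUnescE true (d :: ys) = pvUnescE false ys := fun d ys => rfl
        simp only [Bool.not_true]
        rw [List.cons_append, e1, List.cons_append, e2, pvUnescE_false_append p' _ hp',
          List.append_assoc]

theorem pvQcnt_append (p : List Char) : ∀ (xs : List Char) (outs : Bool), '"' ∉ p →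
    pvQcnt outs (p ++ xs) =
      (if outs then ((p.countP (· == '(') : Int) - (p.countP (· == ')') : Int)) else 0) + pvQcnt outs xs := by
  induction p with
  | nil => intro xs outs _; cases outs <;> simp
  | cons c r ih =>
    intro xs outs h
    simp only [List.mem_cons, not_or] at h
    have hcq : ¬(c = '"') := fun hh => h.1 hh.symm
    simp only [List.cons_append, pvQcnt, if_neg hcq, List.countP_cons]
    cases outs with
    | false => simpa using ih xs false h.2
    | true =>
      rw [ih xs true h.2]
      by_cases h1 : c = '('
      · subst h1
        simp
        ring
      · by_cases h2 : c = ')'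
        · subst h2
          simp [show (')' == '(') = false from rfl]
          ring
        · simp only [if_neg h1, if_neg h2]
          simp [show (c == '(') = false from by simp [h1], show (c == ')') = false from by simp [h2]]

-- chunk-wise value of B's second fold
def pvQcntChunks : Bool → List (List Char) → Int
  | _, [] => 0
  | outs, p :: rest =>
    (if outs then ((p.countP (· == '(') : Int) - (p.countP (· == ')') : Int)) else 0) + pvQcntChunks (!outs) rest

theorem pvChunkFold (chunks : List (List Char)) : ∀ (a : Int) (outs : Bool),
    (chunks.foldl pvChunkStep (a, outs)).1 = a + pvQcntChunks outs chunks := by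
  induction chunks with
  | nil => intro a outs; simp [pvQcntChunks]
  | cons p rest ih =>
    intro a outs
    simp only [List.foldl_cons, pvQcntChunks]
    rw [show pvChunkStep (a, outs) p
          = ((if outs then a + (p.countP (· == '(') : Int) - (p.countP (· == ')') : Int) else a), !outs) by
        simp only [pvChunkStep, pvCount_eq]]
    rw [ih _ (!outs)]
    cases outs with
    | false => simp
    | true => simp only [if_true]; ring

theorem pvQcntChunks_eq (chunks : List (List Char)) : ∀ (outs : Bool),
    (∀ p ∈ chunks, '"' ∉ p) → pvQcntChunks outs chunks = pvQcnt outs (pvJoin '"' chunks) := by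
  induction chunks with
  | nil => intro outs _; simp [pvQcntChunks, pvJoin, pvQcnt]
  | cons p rest ih =>
    intro outs hmem
    have hp : '"' ∉ p := hmem p List.mem_cons_self
    have hrest : ∀ x ∈ rest, '"' ∉ x := fun x hx => hmem x (List.mem_cons_of_mem _ hx)
    cases rest with
    | nil =>
      simp only [pvQcntChunks, pvJoin, List.headD_cons, List.tail_cons, List.map_nil,
        List.flatten_nil, List.append_nil]
      rw [show p = p ++ ([] : List Char) by simp, pvQcnt_append p [] outs hp]
      simp [pvQcnt]
    | cons h2 t2 =>
      rw [show pvQcntChunks outs (p :: h2 :: t2)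
            = (if outs then ((p.countP (· == '(') : Int) - (p.countP (· == ')') : Int)) else 0)
              + pvQcntChunks (!outs) (h2 :: t2) from rfl]
      rw [ih (!outs) hrest]
      rw [show pvJoin '"' (p :: h2 :: t2) = p ++ ('"' :: pvJoin '"' (h2 :: t2)) by
        unfold pvJoin; simp]
      rw [pvQcnt_append p _ outs hp]
      rw [show pvQcnt outs ('"' :: pvJoin '"' (h2 :: t2)) = pvQcnt (!outs) (pvJoin '"' (h2 :: t2)) by
        simp [pvQcnt]]

-- A's fold in terms of the direct functions
theorem pvAFold (l : List Char) : ∀ (d : Int) (ins esc : Bool),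
    (l.foldl pvStepA (d, ins, esc)).1 = d + pvQcnt (!ins) (pvUnescE esc l) := by
  induction l with
  | nil => intro d ins esc; simp [pvUnescE, pvQcnt]
  | cons c r ih =>
    intro d ins esc
    cases esc with
    | true =>
      rw [show (c :: r).foldl pvStepA (d, ins, true) = r.foldl pvStepA (d, ins, false) by
        simp [pvStepA]]
      rw [ih d ins false]
      rfl
    | false =>
      by_cases hbs : c = '\\'
      · subst hbs
        rw [show ('\\' :: r).foldl pvStepA (d, ins, false) = r.foldl pvStepA (d, ins, true) by
          simp [pvStepA]]
        rw [ih d ins true]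
        rfl
      · by_cases hq : c = '"'
        · subst hq
          rw [show ('"' :: r).foldl pvStepA (d, ins, false) = r.foldl pvStepA (d, !ins, false) by
            simp [pvStepA]]
          rw [ih d (!ins) false]
          simp [pvUnescE, pvQcnt]
        · cases ins with
          | true =>
            rw [show (c :: r).foldl pvStepA (d, true, false) = r.foldl pvStepA (d, true, false) by
              simp [pvStepA, hbs, hq]]
            rw [ih d true false]
            simp [pvUnescE, pvQcnt, hbs, hq]
          | false =>
            by_cases h1 : c = '('
            · subst h1
              rw [show ('(' :: r).foldl pvStepA (d, false, false)
                    = r.foldl pvStepA (d + 1, false, false) by simp [pvStepA]]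
              rw [ih (d+1) false false]
              simp [pvUnescE, pvQcnt]
              ring
            · by_cases h2 : c = ')'
              · subst h2
                rw [show (')' :: r).foldl pvStepA (d, false, false)
                      = r.foldl pvStepA (d - 1, false, false) by simp [pvStepA]]
                rw [ih (d-1) false false]
                simp [pvUnescE, pvQcnt]
                ring
              · rw [show (c :: r).foldl pvStepA (d, false, false)
                      = r.foldl pvStepA (d, false, false) by simp [pvStepA, hbs, hq, h1, h2]]
                rw [ih d false false]
                simp [pvUnescE, pvQcnt, hbs, hq, h1, h2]

-- B equals the direct pipeline
theorem pvBDirect (l : List Char) :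
    (((PySem.Chars.splitOn l ['\\']).tail.foldl pvUnescStep ((PySem.Chars.splitOn l ['\\']).headD [], true)).1)
      = pvUnescE false l := by
  rw [pvSplitOn_eq]
  rw [pvUnescFold _ _ _ (fun p hp => pvMySplit_not_mem '\\' l p
        (by rw [pvMySplit_cons_rep '\\' l]; exact List.mem_cons_of_mem _ hp))]
  simp only [Bool.not_true]
  have hhead : '\\' ∉ (pvMySplit '\\' l).headD [] := by
    apply pvMySplit_not_mem '\\' l
    rw [pvMySplit_cons_rep '\\' l]
    exact List.mem_cons_self
  rw [← pvUnescE_false_append _ _ hhead]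
  rw [show (pvMySplit '\\' l).headD [] ++ ((pvMySplit '\\' l).tail.map (fun p => '\\' :: p)).flatten
        = pvJoin '\\' (pvMySplit '\\' l) from rfl]
  rw [pvMySplit_join]

-- ===== VERDICT (by name: the statement is the Claim_ definition above) =====
theorem pvAltDirect (line : String) :
    block_depth_delta_alt line
      = (((PySem.Chars.splitOn (((PySem.Chars.splitOn line.toList ['\\']).tail.foldl pvUnescStep
            ((PySem.Chars.splitOn line.toList ['\\']).headD [], true)).1) ['"'])).foldl
          pvChunkStep (0, true)).1 := rfl

theorem block_depth_delta_spec : Claim_equal_block_depth_delta := by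
  intro line _
  unfold Spec_block_depth_delta block_depth_delta
  rw [pvAltDirect, pvBDirect line.toList, pvAFold line.toList 0 false false]
  rw [pvSplitOn_eq, pvChunkFold]
  rw [pvQcntChunks_eq _ _ (pvMySplit_not_mem '"' _)]
  rw [pvMySplit_join]
  simp
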